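-- pv_equiv track=rewrite | github.com/evelinacs/semantic_parsing_with_IRTGs | code/surface/eval/eval.py | sanitize_word
-- ===== SOURCE A (Python) =====
-- REPLACE_MAP = {
--     ":": "COLON",
--     ",": "COMMA",
--     ".": "PERIOD",
--     ";": "SEMICOLON",
--     "-": "HYPHEN",
--     "[": "LSB",
--     "]": "RSB",
--     "(": "LRB",
--     ")": "RRB",
--     "{": "LCB",
--     "}": "RCB",
--     "!": "EXC",
--     "?": "QUE",
--     "'": "SQ",
--     '"': "DQ",
--     "/": "PER",
--     "\\": "BSL",
--     "#": "HASHTAG",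
--     "%": "PERCENT",
--     "&": "ET",
--     "@": "AT",
--     "$": "DOLLAR",
--     "*": "ASTERISK",
--     "^": "CAP",
--     "`": "IQ",
--     "+": "PLUS",
--     "|": "PIPE",
--     "~": "TILDE",
--     "<": "LESS",
--     ">": "MORE",
--     "=": "EQ"
-- }
--
-- KEYWORDS = set(["feature"])
--
-- def sanitize_word(word):
--     for symbol in ",?.!-:":
--         word = word.replace(symbol, " " + symbol + " ").replace("  ", " ")
--     for pattern, target in REPLACE_MAP.items():
--         word = word.replace(pattern, target)
--     for digit in "0123456789":
--         word = word.replace(digit, "DIGIT")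
--
--     if word in KEYWORDS:
--         word = word.upper()
--     return word
-- ===== SOURCE B (Python) =====
-- KEYWORDS = set(["feature"])
--
-- # One translation table: every REPLACE_MAP punctuation char and every digit -> its word.
-- _TABLE = str.maketrans({
--     ":": "COLON", ",": "COMMA", ".": "PERIOD", ";": "SEMICOLON", "-": "HYPHEN",
--     "[": "LSB", "]": "RSB", "(": "LRB", ")": "RRB", "{": "LCB", "}": "RCB",
--     "!": "EXC", "?": "QUE", "'": "SQ", '"': "DQ", "/": "PER", "\\": "BSL",
--     "#": "HASHTAG", "%": "PERCENT", "&": "ET", "@": "AT", "$": "DOLLAR",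
--     "*": "ASTERISK", "^": "CAP", "`": "IQ", "+": "PLUS", "|": "PIPE",
--     "~": "TILDE", "<": "LESS", ">": "MORE", "=": "EQ",
--     "0": "DIGIT", "1": "DIGIT", "2": "DIGIT", "3": "DIGIT", "4": "DIGIT",
--     "5": "DIGIT", "6": "DIGIT", "7": "DIGIT", "8": "DIGIT", "9": "DIGIT",
-- })
--
-- def sanitize_word(word):
--     for symbol in ",?.!-:":
--         word = word.replace(symbol, " " + symbol + " ").replace("  ", " ")
--     word = word.translate(_TABLE)
--     if word in KEYWORDS:
--         word = word.upper()
--     return word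
-- ===== Notes on version B (the rewrite author's own statement) =====
-- stated objective: idiomatic
-- what changed: The 31 REPLACE_MAP .replace passes and the 10 digit .replace passes are replaced by one str.translate over a single precomputed char-to-word table (one pass over the string instead of 41 full-string scans); the order-sensitive first spacing loop and the keyword check are kept.
import Mathlib
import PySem

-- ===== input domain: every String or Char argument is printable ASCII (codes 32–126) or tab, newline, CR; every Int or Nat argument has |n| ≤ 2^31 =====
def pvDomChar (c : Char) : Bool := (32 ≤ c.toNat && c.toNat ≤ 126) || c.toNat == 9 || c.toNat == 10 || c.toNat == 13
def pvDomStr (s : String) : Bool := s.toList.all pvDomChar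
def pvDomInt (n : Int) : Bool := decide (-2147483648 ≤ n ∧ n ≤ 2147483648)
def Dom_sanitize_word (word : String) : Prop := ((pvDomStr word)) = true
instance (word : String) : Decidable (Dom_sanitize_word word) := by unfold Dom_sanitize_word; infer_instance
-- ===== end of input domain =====

-- B replaces A's 41 sequential full-string .replace passes (REPLACE_MAP + digits) by one
-- table-driven translate pass; the order-sensitive first spacing loop is kept verbatim (idiomatic objective).

-- ===== PORT A =====
def pvReplaceMapA : List (String × String) :=
  [(":", "COLON"), (",", "COMMA"), (".", "PERIOD"), (";", "SEMICOLON"), ("-", "HYPHEN"),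
   ("[", "LSB"), ("]", "RSB"), ("(", "LRB"), (")", "RRB"), ("{", "LCB"), ("}", "RCB"),
   ("!", "EXC"), ("?", "QUE"), ("'", "SQ"), ("\"", "DQ"), ("/", "PER"), ("\\", "BSL"),
   ("#", "HASHTAG"), ("%", "PERCENT"), ("&", "ET"), ("@", "AT"), ("$", "DOLLAR"),
   ("*", "ASTERISK"), ("^", "CAP"), ("`", "IQ"), ("+", "PLUS"), ("|", "PIPE"),
   ("~", "TILDE"), ("<", "LESS"), (">", "MORE"), ("=", "EQ")]

def pvKeywords : PySem.Set String := PySem.Set.ofList ["feature"]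

def sanitize_word (word : String) : String :=
  let w1 := (",?.!-:".toList).foldl
    (fun w symbol =>
      PySem.Str.replace (PySem.Str.replace w (String.ofList [symbol]) (String.ofList [' ', symbol, ' '])) "  " " ")
    word
  let w2 := pvReplaceMapA.foldl (fun w pt => PySem.Str.replace w pt.1 pt.2) w1
  let w3 := ("0123456789".toList).foldl (fun w digit => PySem.Str.replace w (String.ofList [digit]) "DIGIT") w2
  if PySem.Set.contains pvKeywords w3 then PySem.Str.upper w3 else w3

-- ===== PORT B =====
-- the translate table of Source B: each punctuation char and each digit mapped to its word
def pvTableList : List (Char × String) :=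
  [(':', "COLON"), (',', "COMMA"), ('.', "PERIOD"), (';', "SEMICOLON"), ('-', "HYPHEN"),
   ('[', "LSB"), (']', "RSB"), ('(', "LRB"), (')', "RRB"), ('{', "LCB"), ('}', "RCB"),
   ('!', "EXC"), ('?', "QUE"), ('\'', "SQ"), ('"', "DQ"), ('/', "PER"), ('\\', "BSL"),
   ('#', "HASHTAG"), ('%', "PERCENT"), ('&', "ET"), ('@', "AT"), ('$', "DOLLAR"),
   ('*', "ASTERISK"), ('^', "CAP"), ('`', "IQ"), ('+', "PLUS"), ('|', "PIPE"),
   ('~', "TILDE"), ('<', "LESS"), ('>', "MORE"), ('=', "EQ"),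
   ('0', "DIGIT"), ('1', "DIGIT"), ('2', "DIGIT"), ('3', "DIGIT"), ('4', "DIGIT"),
   ('5', "DIGIT"), ('6', "DIGIT"), ('7', "DIGIT"), ('8', "DIGIT"), ('9', "DIGIT")]

def pvTable : PySem.Dict Char String := ⟨pvTableList⟩

def sanitize_word_alt (word : String) : String :=
  let w1 := (",?.!-:".toList).foldl
    (fun w symbol =>
      PySem.Str.replace (PySem.Str.replace w (String.ofList [symbol]) (String.ofList [' ', symbol, ' '])) "  " " ")
    word
  -- word.translate(_TABLE): one pass, char by char, table hit -> word, miss -> the char itself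
  let w2 := String.ofList (w1.toList.flatMap (fun c =>
    match PySem.Dict.get? pvTable c with
    | some t => t.toList
    | none => [c]))
  if PySem.Set.contains pvKeywords w2 then PySem.Str.upper w2 else w2

-- ===== PRECONDITION & SPEC =====
def Spec_sanitize_word (word : String) (out : String) : Prop := out = sanitize_word_alt word
instance (word : String) (out : String) : Decidable (Spec_sanitize_word word out) := by unfold Spec_sanitize_word; infer_instance

-- ===== CLAIM (what is proved, stated in full; the proofs are below) =====
def Claim_equal_sanitize_word : Prop := ∀ (word : String), Dom_sanitize_word word → Spec_sanitize_word word (sanitize_word word)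

-- ===== LEMMAS AND PROOFS =====

-- single-char replace is a character-wise flatMap
theorem pv_go_single (p : Char) (new : List Char) :
    ∀ (l : List Char) (k : Nat) (acc : List Char), l.length ≤ k →
      PySem.Chars.replace.go [p] new k l acc
        = acc.reverse ++ l.flatMap (fun c => if c = p then new else [c]) := by
  intro l
  induction l with
  | nil =>
      intro k acc _
      cases k <;> simp [PySem.Chars.replace.go]
  | cons c t ih =>
      intro k acc hk
      cases k with
      | zero => simp at hk
      | succ k =>
        rw [show PySem.Chars.replace.go [p] new (k+1) (c :: t) acc
              = if [p].isPrefixOf (c :: t)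
                  then PySem.Chars.replace.go [p] new k (List.drop 1 (c :: t)) (new.reverse ++ acc)
                  else PySem.Chars.replace.go [p] new k t (c :: acc) from by
              simp [PySem.Chars.replace.go]]
        have hk' : t.length ≤ k := by simpa using hk
        by_cases hc : c = p
        · have hpre : ([p].isPrefixOf (c :: t)) = true := by
            simp [List.isPrefixOf, hc]
          simp only [hpre, if_true, List.drop_one, List.tail_cons]
          rw [ih k (new.reverse ++ acc) hk']
          simp [hc]
        · have hpre : ([p].isPrefixOf (c :: t)) = false := by
            simp only [List.isPrefixOf, Bool.and_true]
            simp
            exact fun h => hc h.symm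
          simp only [hpre]
          rw [ih k (c :: acc) hk']
          simp [hc]

theorem pv_replace_single (p : Char) (new l : List Char) :
    PySem.Chars.replace l [p] new = l.flatMap (fun c => if c = p then new else [c]) := by
  have h := pv_go_single p new l l.length [] (le_refl _)
  simpa [PySem.Chars.replace] using h

-- first-match translation function of an association list
def pvTr : List (Char × String) → Char → List Char
  | [], c => [c]
  | pt :: ps, c => if c = pt.1 then pt.2.toList else pvTr ps c

theorem pv_tr_notkey : ∀ (ps : List (Char × String)) (c : Char),
    c ∉ ps.map Prod.fst → pvTr ps c = [c] := by
  intro ps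
  induction ps with
  | nil => intro c _; rfl
  | cons pt ps ih =>
      intro c hc
      rw [List.map_cons, List.mem_cons] at hc
      push_neg at hc
      simp [pvTr, hc.1, ih c hc.2]

theorem pv_flatMap_id (g : Char → List Char) :
    ∀ (l : List Char), (∀ x ∈ l, g x = [x]) → l.flatMap g = l := by
  intro l
  induction l with
  | nil => intro _; rfl
  | cons x t ih =>
      intro h
      simp [List.flatMap_cons, h x (by simp), ih (fun y hy => h y (by simp [hy]))]

theorem pv_foldl_flatMap (ps : List (Char × String))
    (H : ∀ pt ∈ ps, ∀ c ∈ pt.2.toList, c ∉ ps.map Prod.fst) :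
    ∀ (s : List Char),
      ps.foldl (fun l pt => l.flatMap (fun c => if c = pt.1 then pt.2.toList else [c])) s
        = s.flatMap (pvTr ps) := by
  induction ps with
  | nil => intro s; simp [pvTr]
  | cons pt ps ih =>
      intro s
      have H' : ∀ q ∈ ps, ∀ c ∈ q.2.toList, c ∉ ps.map Prod.fst := by
        intro q hq c hc
        have hh := H q (by simp [hq]) c hc
        rw [List.map_cons, List.mem_cons] at hh
        push_neg at hh
        exact hh.2
      rw [List.foldl_cons, ih H', List.flatMap_assoc]
      congr 1
      funext c
      by_cases hc : c = pt.1
      · have hkeys : ∀ x ∈ pt.2.toList, pvTr ps x = [x] := by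
          intro x hx
          apply pv_tr_notkey
          have hh := H pt (by simp) x hx
          rw [List.map_cons, List.mem_cons] at hh
          push_neg at hh
          exact hh.2
        simp [hc, pvTr, pv_flatMap_id _ _ hkeys]
      · simp [hc, pvTr]

-- dict lookup realises pvTr
theorem pv_get_tr : ∀ (ps : List (Char × String)) (c : Char),
    (match PySem.Dict.get? ⟨ps⟩ c with
     | some t => t.toList
     | none => [c]) = pvTr ps c := by
  intro ps
  induction ps with
  | nil => intro c; simp [PySem.Dict.get?, pvTr]
  | cons pt ps ih =>
      intro c
      by_cases hc : c = pt.1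
      · simp [PySem.Dict.get?, List.find?, hc, pvTr]
      · have : (pt.1 == c) = false := by simp [beq_iff_eq]; exact fun h => hc h.symm
        simp only [pvTr, if_neg hc]
        rw [← ih c]
        simp [PySem.Dict.get?, List.find?, this]

-- string-level folds move to the character level
theorem pv_fold_str (ps : List (String × String)) :
    ∀ (w : String),
      (ps.foldl (fun w pt => PySem.Str.replace w pt.1 pt.2) w).toList
        = ps.foldl (fun l pt => PySem.Chars.replace l pt.1.toList pt.2.toList) w.toList := by
  induction ps with
  | nil => intro w; rfl
  | cons pt ps ih => intro w; simp [List.foldl_cons, ih, PySem.Str.toList_replace]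

theorem pv_fold_digits (ds : List Char) :
    ∀ (w : String),
      (ds.foldl (fun w d => PySem.Str.replace w (String.ofList [d]) "DIGIT") w).toList
        = ds.foldl (fun l d => PySem.Chars.replace l [d] ("DIGIT" : String).toList) w.toList := by
  induction ds with
  | nil => intro w; rfl
  | cons d ds ih => intro w; simp [List.foldl_cons, ih, PySem.Str.toList_replace]

-- the two concrete A-side folds are one fold over pvTable's pairs
theorem pv_concrete (l : List Char) :
    ("0123456789".toList).foldl (fun l d => PySem.Chars.replace l [d] ("DIGIT" : String).toList)
      (pvReplaceMapA.foldl (fun l pt => PySem.Chars.replace l pt.1.toList pt.2.toList) l)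
    = pvTableList.foldl (fun l pt => PySem.Chars.replace l [pt.1] pt.2.toList) l := by
  have hd : ("0123456789".toList) = ['0','1','2','3','4','5','6','7','8','9'] := rfl
  rw [hd]
  simp only [pvReplaceMapA, pvTableList, List.foldl_cons, List.foldl_nil]
  rfl

theorem pv_table_ok :
    ∀ pt ∈ pvTableList, ∀ c ∈ pt.2.toList, c ∉ pvTableList.map Prod.fst := by
  have h : (pvTableList.all (fun pt => pt.2.toList.all
      (fun c => !((pvTableList.map Prod.fst).contains c)))) = true := by decide
  intro pt hpt c hc
  have h1 := (List.all_eq_true.mp h) pt hpt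
  have h2 := (List.all_eq_true.mp h1) c hc
  simpa using h2

theorem pv_main (w : String) :
    sanitize_word w = sanitize_word_alt w := by
  unfold sanitize_word sanitize_word_alt
  generalize ((",?.!-:".toList).foldl
    (fun w symbol =>
      PySem.Str.replace (PySem.Str.replace w (String.ofList [symbol]) (String.ofList [' ', symbol, ' '])) "  " " ")
    w) = w1
  have h3 :
      (("0123456789".toList).foldl (fun w digit => PySem.Str.replace w (String.ofList [digit]) "DIGIT")
        (pvReplaceMapA.foldl (fun w pt => PySem.Str.replace w pt.1 pt.2) w1))
      = String.ofList (w1.toList.flatMap (fun c =>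
          match PySem.Dict.get? pvTable c with
          | some t => t.toList
          | none => [c])) := by
    apply String.toList_injective
    rw [pv_fold_digits, pv_fold_str, pv_concrete]
    have hrep : (fun (l : List Char) (pt : Char × String) => PySem.Chars.replace l [pt.1] pt.2.toList)
        = fun l pt => l.flatMap (fun c => if c = pt.1 then pt.2.toList else [c]) := by
      funext l pt; exact pv_replace_single _ _ _
    rw [hrep, pv_foldl_flatMap pvTableList pv_table_ok]
    simp only [String.toList_ofList]
    congr 1
    funext c
    exact (pv_get_tr pvTableList c).symm
  simp only [h3]

-- ===== VERDICT (by name: the statement is the Claim_ definition above) =====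
theorem sanitize_word_spec : Claim_equal_sanitize_word := by
  intro word _
  unfold Spec_sanitize_word
  exact pv_main word
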